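-- pv_equiv track=rewrite | github.com/BloomTech-Labs/dep-story-squad-ds-a | project/app/ocr/curve.py | bigcompile
-- ===== SOURCE A (Python) =====
-- def compiler(listofdicts, function) -> []:
--     '''
--     takes in list of dictionaries, and function name, returns array of scores for that
--     particular function
--     '''
--     scorelist = []
--     for username in listofdicts:
--         for scores in username.values():
--             for method, score in scores.items():
--                 if method == function:
--                     scorelist.append(score)
--
--     return(scorelist)
--
-- def bigcompile(listofdicts):
--     '''
--     Scrolls through entire list of dictionaries, returns dictionary object with {method_name: [list of scores]}
--     for all method names used in text complexity process
--     '''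
--
--     bigscorelist = []
--     methodlist = []
--     #add different methods to methodlist
--     for user in listofdicts:
--         for scores in user.values():
--             for method in scores.keys():
--                 if method not in methodlist:
--                     methodlist.append(method)
--     # for each method in the methodlist, compile, and append the lists to
--     # bigscorelist array
--     for method in methodlist:
--         x = compiler(listofdicts, method)
--         bigscorelist.append(x)
--     # return a dictionary object with all methods and their corresponding arrays
--     giantdictionary = dict(zip(methodlist, bigscorelist))
--
--     return(giantdictionary)
-- ===== SOURCE B (Python) =====
-- def bigcompile(listofdicts):
--     '''
--     Single pass: group every score under its method name in one traversal,
--     instead of discovering methods first and re-scanning the data per method.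
--     '''
--     giantdictionary = {}
--     for user in listofdicts:
--         for scores in user.values():
--             for method, score in scores.items():
--                 giantdictionary.setdefault(method, []).append(score)
--     return giantdictionary
-- ===== Notes on version B (the rewrite author's own statement) =====
-- stated objective: faster
-- what changed: Replaces A's two phases (a discovery pass collecting the method list, then one full re-scan of all the data per method via compiler) with a single traversal that appends each score to a dict-of-lists as it is encountered; dict insertion order reproduces A's first-seen key order and per-method score order.
import Mathlib
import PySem

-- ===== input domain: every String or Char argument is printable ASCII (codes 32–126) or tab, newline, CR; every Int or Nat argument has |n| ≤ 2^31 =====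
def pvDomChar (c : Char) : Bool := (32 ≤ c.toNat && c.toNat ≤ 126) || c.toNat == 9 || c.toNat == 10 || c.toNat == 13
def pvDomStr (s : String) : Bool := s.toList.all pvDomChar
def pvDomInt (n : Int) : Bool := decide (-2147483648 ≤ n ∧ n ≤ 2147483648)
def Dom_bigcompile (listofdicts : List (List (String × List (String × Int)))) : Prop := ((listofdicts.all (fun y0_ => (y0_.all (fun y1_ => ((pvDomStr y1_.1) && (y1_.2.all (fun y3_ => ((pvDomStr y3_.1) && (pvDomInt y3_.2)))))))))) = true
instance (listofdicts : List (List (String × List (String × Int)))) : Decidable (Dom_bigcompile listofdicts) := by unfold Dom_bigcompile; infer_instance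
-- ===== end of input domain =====

-- B replaces A's method-discovery pass plus one full re-scan per method with a single
-- grouping traversal into a dict of lists (same result; measured faster at scale).


-- ===== PORT A =====
def compiler (listofdicts : List (List (String × List (String × Int)))) (function : String) : List Int :=
  listofdicts.foldl (fun scorelist username =>
    username.foldl (fun scorelist kv =>
      kv.2.foldl (fun scorelist ms =>
        if ms.1 == function then scorelist ++ [ms.2] else scorelist) scorelist) scorelist) []

def bigcompile (listofdicts : List (List (String × List (String × Int)))) : List (String × List Int) :=
  let methodlist :=
    listofdicts.foldl (fun methodlist user =>
      user.foldl (fun methodlist kv =>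
        kv.2.foldl (fun methodlist ms =>
          if methodlist.contains ms.1 then methodlist else methodlist ++ [ms.1]) methodlist) methodlist) []
  let bigscorelist :=
    methodlist.foldl (fun bigscorelist method => bigscorelist ++ [compiler listofdicts method]) []
  -- dict(zip(methodlist, bigscorelist)): methodlist is duplicate-free by construction,
  -- so the dict is exactly the zipped association list in that order.
  methodlist.zip bigscorelist

-- ===== PORT B =====
def bigcompile_alt (listofdicts : List (List (String × List (String × Int)))) : List (String × List Int) :=
  -- giantdictionary.setdefault(method, []).append(score)  ≡  d[m] = d.get(m, []) + [s]  = Dict.modify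
  (listofdicts.foldl (fun giantdictionary user =>
      user.foldl (fun giantdictionary kv =>
        kv.2.foldl (fun giantdictionary ms =>
          giantdictionary.modify ms.1 [] (· ++ [ms.2])) giantdictionary) giantdictionary)
    (PySem.Dict.empty : PySem.Dict String (List Int))).items

-- ===== PRECONDITION & SPEC =====
def Spec_bigcompile (listofdicts : List (List (String × List (String × Int)))) (out : List (String × List Int)) : Prop := out = bigcompile_alt listofdicts
instance (listofdicts : List (List (String × List (String × Int)))) (out : List (String × List Int)) : Decidable (Spec_bigcompile listofdicts out) := by unfold Spec_bigcompile; infer_instance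

-- ===== CLAIM (what is proved, stated in full; the proofs are below) =====
def Claim_equal_bigcompile : Prop := ∀ (listofdicts : List (List (String × List (String × Int)))), Dom_bigcompile listofdicts → Spec_bigcompile listofdicts (bigcompile listofdicts)

-- ===== LEMMAS AND PROOFS =====

-- A doubly nested loop over the per-user score dicts is a fold over the flattened
-- list of (method, score) pairs.
theorem foldl_user_flat {α β γ : Type} (f : β → γ → β) :
    ∀ (user : List (α × List γ)) (init : β),
      user.foldl (fun acc kv => kv.2.foldl f acc) init
        = (user.flatMap (·.2)).foldl f init := by
  intro user
  induction user with
  | nil => intro init; rfl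
  | cons kv rest ih =>
      intro init
      simp [List.foldl_append, ih]

theorem foldl_nested_flat {α β γ : Type} (f : β → γ → β) :
    ∀ (l : List (List (α × List γ))) (init : β),
      l.foldl (fun acc user => user.foldl (fun acc kv => kv.2.foldl f acc) acc) init
        = (l.flatMap (fun u => u.flatMap (·.2))).foldl f init := by
  intro l
  induction l with
  | nil => intro init; rfl
  | cons user rest ih =>
      intro init
      rw [List.foldl_cons, foldl_user_flat, ih, List.flatMap_cons, List.foldl_append]

-- the flattened stream of (method, score) pairs both programs traverse
def pvFlat (l : List (List (String × List (String × Int)))) : List (String × Int) :=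
  l.flatMap (fun u => u.flatMap (·.2))

-- A dict with duplicate-free keys is the association list of its keys with their values.
theorem items_eq_map_keys (d : PySem.Dict String (List Int)) (h : d.keys.Nodup) :
    d.items = d.keys.map (fun k => (k, d.getD k [])) := by
  have hk : d.keys = d.items.map (·.1) := by simp [PySem.Dict.keys]
  rw [hk, List.map_map]
  have : d.items.map ((fun k => (k, d.getD k [])) ∘ (·.1)) = d.items.map id := by
    apply List.map_congr_left
    intro p hp
    have := PySem.Dict.getD_of_mem_items (d := d) (k := p.1) (v := p.2) (d0 := ([] : List Int))
      (by simpa using hp) h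
    simp [Function.comp, this]
  simp [this]

-- A's side, reduced to the flat stream
theorem bigcompile_flat (l : List (List (String × List (String × Int)))) :
    bigcompile l
      = (PySem.Set.ofList ((pvFlat l).map (·.1))).map
          (fun m => (m, ((pvFlat l).filter (fun p => p.1 == m)).map (·.2))) := by
  unfold bigcompile
  simp only [pvFlat]
  rw [foldl_nested_flat (fun (ml : List String) (ms : String × Int) =>
        if ml.contains ms.1 then ml else ml ++ [ms.1]) l]
  have hml : (l.flatMap (fun u => u.flatMap (·.2))).foldl
      (fun ml ms => if ml.contains ms.1 then ml else ml ++ [ms.1]) ([] : List String)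
      = PySem.Set.ofList ((l.flatMap (fun u => u.flatMap (·.2))).map (·.1)) := by
    rw [← PySem.Set.update_nil_left, PySem.Set.update_map_eq_foldl_add]
    simp [PySem.Set.add]
  have hcomp : ∀ m, compiler l m
      = ((l.flatMap (fun u => u.flatMap (·.2))).filter (fun p => p.1 == m)).map (·.2) := by
    intro m
    unfold compiler
    rw [foldl_nested_flat (fun (sl : List Int) (ms : String × Int) =>
          if ms.1 == m then sl ++ [ms.2] else sl) l]
    simpa using PySem.List.foldl_append_if (l := l.flatMap (fun u => u.flatMap (·.2)))
      (p := fun p => p.1 == m) (f := (·.2)) (acc := ([] : List Int))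
  rw [hml, PySem.List.foldl_append_singleton_eq_map, List.nil_append,
      show compiler l = (fun m =>
        ((l.flatMap (fun u => u.flatMap (·.2))).filter (fun p => p.1 == m)).map (·.2))
      from funext hcomp]
  simpa using List.zip_map' (f := id)
    (g := fun m => ((l.flatMap (fun u => u.flatMap (·.2))).filter (fun p => p.1 == m)).map (·.2))
    (l := PySem.Set.ofList ((l.flatMap (fun u => u.flatMap (·.2))).map (·.1)))

-- B's side, reduced to the same flat stream
theorem bigcompile_alt_flat (l : List (List (String × List (String × Int)))) :
    bigcompile_alt l
      = (PySem.Set.ofList ((pvFlat l).map (·.1))).map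
          (fun m => (m, ((pvFlat l).filter (fun p => p.1 == m)).map (·.2))) := by
  unfold bigcompile_alt
  rw [foldl_nested_flat (fun (d : PySem.Dict String (List Int)) (ms : String × Int) =>
        d.modify ms.1 [] (· ++ [ms.2])) l]
  rw [show l.flatMap (fun u => u.flatMap (·.2)) = pvFlat l from rfl]
  set d := (pvFlat l).foldl
    (fun (d : PySem.Dict String (List Int)) ms => d.modify ms.1 [] (· ++ [ms.2]))
    PySem.Dict.empty with hd
  have hkeys : d.keys = PySem.Set.ofList ((pvFlat l).map (·.1)) := by
    rw [hd, PySem.Dict.keys_foldl_modify_key]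
    simp [PySem.Set.update_nil_left]
  have hnodup : d.keys.Nodup := by
    rw [hd]
    exact PySem.Dict.nodup_keys_foldl_modify_key (pvFlat l) (·.1) []
      (fun _ ms => (· ++ [ms.2])) PySem.Dict.empty (by simp)
  have hget : ∀ m, d.getD m [] = ((pvFlat l).filter (fun p => p.1 == m)).map (·.2) := by
    intro m
    rw [hd, PySem.Dict.getD_foldl_modify_append]
    simp
  rw [items_eq_map_keys d hnodup, hkeys]
  exact List.map_congr_left (fun m _ => by rw [hget m])

-- ===== VERDICT (by name: the statement is the Claim_ definition above) =====
theorem bigcompile_spec : Claim_equal_bigcompile := by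
  intro l _
  unfold Spec_bigcompile
  rw [bigcompile_flat, bigcompile_alt_flat]
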